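-- pv_equiv track=rewrite | github.com/kalwarali567-commits/project | calendar.py | getTotalNumberOfDays
-- ===== SOURCE A (Python) =====
-- def getTotalNumberOfDays(year, month):
--     total = 0
--
--     # Add total days for all full years from 1700 to the given year
--     for i in range(1700, year):
--         if isleapyear(i):
--             total += 366
--         else:
--             total += 365
--
--     # Add total days for all months before the given month in the same year
--     for i in range(1, month):
--         total += gettotalNumberOfDaysInMonth(year, i)
--
--     return total
--
-- def gettotalNumberOfDaysInMonth(year, month):
--     if month in [1, 3, 5, 7, 8, 10, 12]:
--         return 31             # Months with 31 days
--     if month in [4, 6, 9, 11]: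
--         return 30             # Months with 30 days
--     if month == 2:
--         return 29 if isleapyear(year) else 28  # February logic (leap year or not)
--     return 0
--
-- def isleapyear(year):
--     return year % 400 == 0 or (year % 4 == 0 and year % 100 != 0)
-- ===== SOURCE B (Python) =====
-- # Closed-form day count: no per-year loop, one pass over the 12-month table.
--
-- _MONTHS = ((1, 31), (2, 28), (3, 31), (4, 30), (5, 31), (6, 30),
--            (7, 31), (8, 31), (9, 30), (10, 31), (11, 30), (12, 31))
--
--
-- def _is_leap(year):
--     return year % 400 == 0 or (year % 4 == 0 and year % 100 != 0)
--
--
-- def _leaps_below(n):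
--     # number of leap years y with y < n (proleptic Gregorian)
--     return (n - 1) // 4 - (n - 1) // 100 + (n - 1) // 400
--
--
-- def _days_before_month(month):
--     # days contributed by the whole months preceding `month` (February as 28)
--     return sum(days for m, days in _MONTHS if m < month)
--
--
-- def getTotalNumberOfDays(year, month):
--     n = len(range(1700, year))  # number of full years from 1700
--     total = 365 * n + _leaps_below(1700 + n) - _leaps_below(1700)
--     total += _days_before_month(month)
--     if month > 2 and _is_leap(year):
--         total += 1
--     return total
-- ===== Notes on version B (the rewrite author's own statement) =====
-- stated objective: faster
-- what changed: Replaces A's per-year loop with a closed-form floor-division leap-year count and A's per-month loop with a single pass over the fixed 12-month table.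
import Mathlib
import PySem

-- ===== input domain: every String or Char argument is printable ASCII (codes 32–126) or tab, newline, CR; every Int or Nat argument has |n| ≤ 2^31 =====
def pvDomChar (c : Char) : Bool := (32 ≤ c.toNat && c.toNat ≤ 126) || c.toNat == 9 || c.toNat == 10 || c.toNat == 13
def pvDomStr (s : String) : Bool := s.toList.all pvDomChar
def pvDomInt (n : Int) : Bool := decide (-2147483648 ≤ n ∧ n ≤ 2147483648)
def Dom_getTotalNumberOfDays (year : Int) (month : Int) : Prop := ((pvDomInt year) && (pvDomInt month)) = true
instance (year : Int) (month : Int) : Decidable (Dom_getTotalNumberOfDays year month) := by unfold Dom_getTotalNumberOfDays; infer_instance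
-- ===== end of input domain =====

-- B replaces A's per-year and per-month loops by a closed form (floor-division leap count,
-- one pass over the fixed 12-month table); objective: faster (O(1) vs O(year+month) loop iterations).

-- ===== PORT A =====
def isleapyear (y : Int) : Bool :=
  (PySem.Int.mod y 400 == 0) || ((PySem.Int.mod y 4 == 0) && !(PySem.Int.mod y 100 == 0))

def gettotalNumberOfDaysInMonth (year : Int) (month : Int) : Int :=
  if month = 1 ∨ month = 3 ∨ month = 5 ∨ month = 7 ∨ month = 8 ∨ month = 10 ∨ month = 12 then 31
  else if month = 4 ∨ month = 6 ∨ month = 9 ∨ month = 11 then 30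
  else if month = 2 then (if isleapyear year then 29 else 28)
  else 0

def getTotalNumberOfDays (year : Int) (month : Int) : Int :=
  let total : Int := 0
  let total := (PySem.List.pyRange 1700 year 1).foldl
      (fun acc i => if isleapyear i then acc + 366 else acc + 365) total
  let total := (PySem.List.pyRange 1 month 1).foldl
      (fun acc i => acc + gettotalNumberOfDaysInMonth year i) total
  total

-- ===== PORT B =====
def altMonths : List (Int × Int) :=
  [(1, 31), (2, 28), (3, 31), (4, 30), (5, 31), (6, 30),
   (7, 31), (8, 31), (9, 30), (10, 31), (11, 30), (12, 31)]

def altIsLeap (y : Int) : Bool :=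
  (PySem.Int.mod y 400 == 0) || ((PySem.Int.mod y 4 == 0) && !(PySem.Int.mod y 100 == 0))

def altLeapsBelow (n : Int) : Int :=
  PySem.Int.floordiv (n - 1) 4 - PySem.Int.floordiv (n - 1) 100 + PySem.Int.floordiv (n - 1) 400

def altDaysBeforeMonth (month : Int) : Int :=
  altMonths.foldl (fun acc p => if p.1 < month then acc + p.2 else acc) 0

def getTotalNumberOfDays_alt (year : Int) (month : Int) : Int :=
  let n : Int := max (year - 1700) 0   -- len(range(1700, year))
  let total := 365 * n + altLeapsBelow (1700 + n) - altLeapsBelow 1700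
  let total := total + altDaysBeforeMonth month
  if 2 < month ∧ altIsLeap year = true then total + 1 else total

-- ===== PRECONDITION & SPEC =====
def Spec_getTotalNumberOfDays (year : Int) (month : Int) (out : Int) : Prop := out = getTotalNumberOfDays_alt year month
instance (year : Int) (month : Int) (out : Int) : Decidable (Spec_getTotalNumberOfDays year month out) := by unfold Spec_getTotalNumberOfDays; infer_instance

-- ===== CLAIM (what is proved, stated in full; the proofs are below) =====
def Claim_equal_getTotalNumberOfDays : Prop := ∀ (year : Int) (month : Int), Dom_getTotalNumberOfDays year month → Spec_getTotalNumberOfDays year month (getTotalNumberOfDays year month)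

-- ===== LEMMAS AND PROOFS =====

theorem fd_pos : ∀ (a b : Int), 0 < b → PySem.Int.floordiv a b = a / b := by
  intro a b hb; apply PySem.Int.floordiv_eq_ediv_of_pos; exact hb

theorem leap_iff (k : Int) :
    isleapyear k = true ↔ (k % 400 = 0 ∨ (k % 4 = 0 ∧ ¬ k % 100 = 0)) := by
  simp [isleapyear]

-- one leap-count step: altLeapsBelow (k+1) - altLeapsBelow k tests exactly year k
theorem leap_step (k : Int) :
    altLeapsBelow (k + 1) = altLeapsBelow k + (if isleapyear k then 1 else 0) := by
  have h4 := fd_pos k 4 (by norm_num)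
  have h100 := fd_pos k 100 (by norm_num)
  have h400 := fd_pos k 400 (by norm_num)
  have g4 := fd_pos (k - 1) 4 (by norm_num)
  have g100 := fd_pos (k - 1) 100 (by norm_num)
  have g400 := fd_pos (k - 1) 400 (by norm_num)
  have e1 : k + 1 - 1 = k := by ring
  have i1 : k % 400 = 0 → k % 100 = 0 := by omega
  have i2 : k % 100 = 0 → k % 4 = 0 := by omega
  have s4a : k % 4 = 0 → k / 4 = (k - 1) / 4 + 1 := by omega
  have s4b : ¬ k % 4 = 0 → k / 4 = (k - 1) / 4 := by omega
  have sba : k % 100 = 0 → k / 100 = (k - 1) / 100 + 1 := by omega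
  have sbb : ¬ k % 100 = 0 → k / 100 = (k - 1) / 100 := by omega
  have sca : k % 400 = 0 → k / 400 = (k - 1) / 400 + 1 := by omega
  have scb : ¬ k % 400 = 0 → k / 400 = (k - 1) / 400 := by omega
  simp only [altLeapsBelow, e1, h4, h100, h400, g4, g100, g400]
  by_cases h : isleapyear k = true
  · rw [if_pos h]
    rcases (leap_iff k).mp h with hk | ⟨hk4, hk100⟩
    · rw [s4a (i2 (i1 hk)), sba (i1 hk), sca hk]; ring
    · have hk400 : ¬ k % 400 = 0 := fun c => hk100 (i1 c)
      rw [s4a hk4, sbb hk100, scb hk400]; ring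
  · rw [if_neg h]
    have hk : ¬ (k % 400 = 0 ∨ (k % 4 = 0 ∧ ¬ k % 100 = 0)) := fun c => h ((leap_iff k).mpr c)
    push_neg at hk
    obtain ⟨hk400, hk2⟩ := hk
    by_cases c4 : k % 4 = 0
    · rw [s4a c4, sba (hk2 c4), scb hk400]; ring
    · have c100 : ¬ k % 100 = 0 := fun c => c4 (i2 c)
      rw [s4b c4, sbb c100, scb hk400]; ring

-- year loop = closed form
theorem year_fold (n : Nat) :
    (PySem.List.pyRange 1700 (1700 + (n : Int)) 1).foldl
      (fun acc i => if isleapyear i then acc + 366 else acc + 365) 0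
      = 365 * (n : Int) + altLeapsBelow (1700 + (n : Int)) - altLeapsBelow 1700 := by
  induction n with
  | zero => simp [PySem.List.pyRange_one_eq_nil (by omega : (1700:Int) + (0:Nat) ≤ 1700)]
  | succ m ih =>
    push_cast
    rw [show (1700:Int) + ((m:Int) + 1) = (1700 + (m:Int)) + 1 from by ring,
        PySem.List.pyRange_one_succ_right (by omega), List.foldl_append]
    simp only [List.foldl_cons, List.foldl_nil]
    rw [ih, leap_step (1700 + (m:Int))]
    by_cases h : isleapyear (1700 + (m:Int)) = true <;> simp only [h, if_true, if_false] <;> push_cast <;> ring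

-- months beyond 12 contribute 0 days
theorem month_big_zero (year : Int) (i : Int) (hi : 13 ≤ i) :
    gettotalNumberOfDaysInMonth year i = 0 := by
  unfold gettotalNumberOfDaysInMonth
  split_ifs <;> omega

theorem month_tail (year : Int) (t : Int) (n : Nat) :
    (PySem.List.pyRange 1 (13 + (n : Int)) 1).foldl
      (fun acc i => acc + gettotalNumberOfDaysInMonth year i) t
      = (PySem.List.pyRange 1 13 1).foldl
      (fun acc i => acc + gettotalNumberOfDaysInMonth year i) t := by
  induction n with
  | zero => norm_num
  | succ m ih =>
    push_cast
    rw [show (13:Int) + ((m:Int) + 1) = (13 + (m:Int)) + 1 from by ring,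
        PySem.List.pyRange_one_succ_right (by omega), List.foldl_append]
    simp only [List.foldl_cons, List.foldl_nil]
    rw [month_big_zero year (13 + (m:Int)) (by omega), add_zero]
    push_cast at ih
    exact ih

-- B's table pass is constant once every month precedes `month`
theorem table_all (month : Int) (h : 13 ≤ month) : altDaysBeforeMonth month = 365 := by
  have h1 : (1:Int) < month := by omega
  have h2 : (2:Int) < month := by omega
  have h3 : (3:Int) < month := by omega
  have h4 : (4:Int) < month := by omega
  have h5 : (5:Int) < month := by omega
  have h6 : (6:Int) < month := by omega
  have h7 : (7:Int) < month := by omega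
  have h8 : (8:Int) < month := by omega
  have h9 : (9:Int) < month := by omega
  have h10 : (10:Int) < month := by omega
  have h11 : (11:Int) < month := by omega
  have h12 : (12:Int) < month := by omega
  simp [altDaysBeforeMonth, altMonths, h1, h2, h3, h4, h5, h6, h7, h8, h9, h10, h11, h12]

theorem month_closed (year : Int) (m : Int) (t : Int) (h1 : 1 ≤ m) (h2 : m ≤ 13) :
    (PySem.List.pyRange 1 m 1).foldl
      (fun acc i => acc + gettotalNumberOfDaysInMonth year i) t
      = t + altDaysBeforeMonth m + (if 2 < m ∧ altIsLeap year = true then 1 else 0) := by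
  have hsame : altIsLeap = isleapyear := rfl
  interval_cases m <;>
    by_cases hL : isleapyear year = true <;>
    simp [hsame, hL, gettotalNumberOfDaysInMonth, altDaysBeforeMonth, altMonths,
          PySem.List.pyRange_one, List.range_succ] <;>
    ring

theorem main_eq (year month : Int) :
    getTotalNumberOfDays year month = getTotalNumberOfDays_alt year month := by
  have hY : (PySem.List.pyRange 1700 year 1).foldl
      (fun acc i => if isleapyear i then acc + 366 else acc + 365) 0
      = 365 * max (year - 1700) 0
        + altLeapsBelow (1700 + max (year - 1700) 0) - altLeapsBelow 1700 := by
    by_cases hy : year > 1700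
    · have hmax : max (year - 1700) 0 = year - 1700 := by omega
      rw [hmax]
      have ht : ((year - 1700).toNat : Int) = year - 1700 := by omega
      have hn : year = 1700 + ((year - 1700).toNat : Int) := by omega
      conv_lhs => rw [hn]
      rw [year_fold ((year - 1700).toNat), ht,
          show (1700:Int) + (year - 1700) = year from by ring]
    · have hmax : max (year - 1700) 0 = 0 := by omega
      rw [hmax, PySem.List.pyRange_one_eq_nil (by omega)]
      simp
  simp only [getTotalNumberOfDays, getTotalNumberOfDays_alt]
  rw [hY]
  by_cases hm1 : month < 1
  · rw [PySem.List.pyRange_one_eq_nil (by omega)]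
    have hz : altDaysBeforeMonth month = 0 := by
      have e1 : ¬ (1:Int) < month := by omega
      have e2 : ¬ (2:Int) < month := by omega
      have e3 : ¬ (3:Int) < month := by omega
      have e4 : ¬ (4:Int) < month := by omega
      have e5 : ¬ (5:Int) < month := by omega
      have e6 : ¬ (6:Int) < month := by omega
      have e7 : ¬ (7:Int) < month := by omega
      have e8 : ¬ (8:Int) < month := by omega
      have e9 : ¬ (9:Int) < month := by omega
      have e10 : ¬ (10:Int) < month := by omega
      have e11 : ¬ (11:Int) < month := by omega
      have e12 : ¬ (12:Int) < month := by omega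
      simp [altDaysBeforeMonth, altMonths, e1, e2, e3, e4, e5, e6, e7, e8, e9, e10, e11, e12]
    rw [if_neg (by omega : ¬ (2 < month ∧ altIsLeap year = true)), hz]
    simp only [List.foldl_nil]
    ring
  · by_cases hm2 : month > 13
    · have hn : month = 13 + ((month - 13).toNat : Int) := by omega
      conv_lhs => rw [hn]
      rw [month_tail, month_closed year 13 _ (by omega) (by omega),
          table_all 13 (by omega), table_all month (by omega)]
      have : (2 < (13:Int) ∧ altIsLeap year = true) ↔ (2 < month ∧ altIsLeap year = true) := by
        constructor <;> intro h <;> exact ⟨by omega, h.2⟩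
      split_ifs with ha hb hb
      · ring
      · exact absurd (this.mp ha) hb
      · exact absurd (this.mpr hb) ha
      · ring
    · rw [month_closed year month _ (by omega) (by omega)]
      split_ifs <;> ring

-- ===== VERDICT (by name: the statement is the Claim_ definition above) =====
theorem getTotalNumberOfDays_spec : Claim_equal_getTotalNumberOfDays := by
  intro year month _
  unfold Spec_getTotalNumberOfDays
  exact main_eq year month
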